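-- pv_equiv track=rewrite | github.com/lin/lin.github.io | public/cp/cf/834/b.py | solve
-- ===== SOURCE A (Python) =====
-- def solve(m, target, nums):
--     max_val = max(nums)
--     nums_set = set(nums)
--     missing = 0
--     for i in range(1, max_val + 1):
--         if i not in nums_set:
--             missing += i
--     if target < missing:
--         return False
--     extra = target - missing
--     k = max_val + 1
--     while extra > 0:
--         extra -= k
--         k += 1
--     return extra == 0
-- ===== SOURCE B (Python) =====
-- def _isqrt(n):
--     # floor integer square root by binary search (n >= 0)
--     lo, hi = 0, n + 1
--     while hi - lo > 1:
--         mid = (lo + hi) // 2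
--         if mid * mid <= n:
--             lo = mid
--         else:
--             hi = mid
--     return lo
--
--
-- def solve(m, target, nums):
--     mx = max(nums)
--     present = 0
--     for x in set(nums):
--         if 1 <= x <= mx:
--             present += x
--     missing = mx * (mx + 1) // 2 - present if mx >= 1 else 0
--     extra = target - missing
--     if extra < 0:
--         return False
--     # extra is a sum of consecutive integers starting at mx+1
--     # iff d = (2*mx+1)**2 + 8*extra is a perfect square
--     d = (2 * mx + 1) ** 2 + 8 * extra
--     s = _isqrt(d)
--     return s * s == d
-- ===== Notes on version B (the rewrite author's own statement) =====
-- stated objective: faster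
-- what changed: B replaces A's O(max(nums)) loop over 1..max with a closed-form triangular-number formula minus the sum of distinct in-range elements, and replaces A's consecutive-subtraction while-loop with a discriminant perfect-square test using a binary-search integer square root.
import Mathlib
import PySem

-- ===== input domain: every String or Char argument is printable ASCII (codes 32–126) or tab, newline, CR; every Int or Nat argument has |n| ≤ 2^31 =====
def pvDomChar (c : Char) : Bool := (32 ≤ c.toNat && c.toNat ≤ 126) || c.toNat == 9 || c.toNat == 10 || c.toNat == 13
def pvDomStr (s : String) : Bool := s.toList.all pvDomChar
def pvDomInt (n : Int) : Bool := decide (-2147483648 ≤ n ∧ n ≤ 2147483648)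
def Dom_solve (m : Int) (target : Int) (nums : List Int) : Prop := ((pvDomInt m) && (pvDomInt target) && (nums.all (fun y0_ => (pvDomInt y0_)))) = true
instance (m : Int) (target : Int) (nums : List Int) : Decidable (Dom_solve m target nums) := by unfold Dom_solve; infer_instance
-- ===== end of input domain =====

-- B replaces A's O(max(nums)) missing-sum loop by a triangular-number formula over the distinct
-- elements and A's consecutive-subtraction while-loop by a perfect-square (discriminant) test
-- with a binary-search integer square root; objective: faster (asymptotic).

-- ===== PORT A =====
-- the while-loop 'while extra > 0: extra -= k; k += 1', returning the final extra
def solveLoopA (extra k : Int) : Int :=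
  if extra > 0 then solveLoopA (extra - k) (k + 1) else extra
termination_by ((1 - k).toNat, extra.toNat)
decreasing_by
  rename_i h
  rcases (by omega : k ≤ 0 ∨ 0 < k) with hk | hk
  · exact Prod.Lex.left _ _ (by omega)
  · have h1 : (1 - (k+1)).toNat = (1 - k).toNat := by omega
    rw [h1]
    exact Prod.Lex.right _ (by omega)

def solve (m : Int) (target : Int) (nums : List Int) : Bool :=
  let max_val := (PySem.List.max? nums (fun x => x)).getD 0  -- max(nums); [] raises ValueError, excluded by Pre_
  let nums_set := PySem.Set.ofList nums
  let missing := (PySem.List.pyRange 1 (max_val + 1) 1).foldl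
      (fun missing i => if PySem.Set.contains nums_set i then missing else missing + i) 0
  if target < missing then false
  else
    let extra := target - missing
    solveLoopA extra (max_val + 1) == 0

-- ===== PORT B =====
-- binary-search integer square root, Source B's _isqrt loop
def isqrtGo (n lo hi : Int) : Int :=
  if hi - lo > 1 then
    let mid := PySem.Int.floordiv (lo + hi) 2
    if mid * mid ≤ n then isqrtGo n mid hi else isqrtGo n lo mid
  else lo
termination_by (hi - lo).toNat
decreasing_by
  all_goals rename_i h
  all_goals rw [Int.toNat_lt_toNat (by omega)]
  all_goals rw [PySem.Int.floordiv_eq_ediv_of_pos (by omega)] at *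
  all_goals omega

def isqrt (n : Int) : Int := isqrtGo n 0 (n + 1)

def solve_alt (m : Int) (target : Int) (nums : List Int) : Bool :=
  let mx := (PySem.List.max? nums (fun x => x)).getD 0  -- max(nums); [] raises ValueError, excluded by Pre_
  let present := (PySem.Set.ofList nums).foldl
      (fun a x => if 1 ≤ x ∧ x ≤ mx then a + x else a) 0
  let missing := if 1 ≤ mx then PySem.Int.floordiv (mx * (mx + 1)) 2 - present else 0
  let extra := target - missing
  if extra < 0 then false
  else
    let d := (2 * mx + 1) ^ 2 + 8 * extra
    let s := isqrt d
    s * s == d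

-- ===== PRECONDITION & SPEC =====
-- Pre_ excludes only nums = [], on which A (and B) raise ValueError from max(nums)
def Pre_solve (m : Int) (target : Int) (nums : List Int) : Prop := nums ≠ []
instance (m : Int) (target : Int) (nums : List Int) : Decidable (Pre_solve m target nums) := by unfold Pre_solve; infer_instance
def pvWitness_solve : Int × Int × List Int := (0, 10, [1, 3])

def Spec_solve (m : Int) (target : Int) (nums : List Int) (out : Bool) : Prop := out = solve_alt m target nums
instance (m : Int) (target : Int) (nums : List Int) (out : Bool) : Decidable (Spec_solve m target nums out) := by unfold Spec_solve; infer_instance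

-- ===== CLAIM (what is proved, stated in full; the proofs are below) =====
def Claim_equal_solve : Prop := ∀ (m : Int) (target : Int) (nums : List Int), Dom_solve m target nums → Pre_solve m target nums → Spec_solve m target nums (solve m target nums)

-- ===== LEMMAS AND PROOFS =====

-- generic fold-as-filter-sum
theorem foldl_ite_add (l : List Int) (p : Int → Prop) [DecidablePred p] (a : Int) :
    l.foldl (fun a x => if p x then a + x else a) a = a + (l.filter (fun x => decide (p x))).sum := by
  induction l generalizing a with
  | nil => simp
  | cons x t ih => by_cases h : p x <;> simp [h, ih] <;> ring

theorem foldl_ite_skip (l : List Int) (p : Int → Bool) (a : Int) :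
    l.foldl (fun a x => if p x then a else a + x) a = a + (l.filter (fun x => ! p x)).sum := by
  induction l generalizing a with
  | nil => simp
  | cons x t ih => cases h : p x <;> simp [h, ih] <;> ring

theorem sum_filter_add_sum_filter_not (l : List Int) (p : Int → Bool) :
    (l.filter p).sum + (l.filter (fun x => ! p x)).sum = l.sum := by
  induction l with
  | nil => simp
  | cons x t ih => cases h : p x <;> simp [h] <;> linarith

theorem sum_range_one (n : Nat) :
    2 * (((List.range n).map (fun k : Nat => (1 : Int) + (k : Int))).sum) = n * (n + 1) := by
  induction n with
  | zero => simp
  | succ k ih =>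
    rw [List.range_succ, List.map_append, List.sum_append]
    simp only [List.map_cons, List.map_nil, List.sum_cons, List.sum_nil]
    push_cast
    push_cast at ih
    linarith

-- the missing sum equals the triangular-number formula minus the in-range distinct sum
theorem missing_eq (S : List Int) (hS : S.Nodup) (mx : Int) :
    (PySem.List.pyRange 1 (mx + 1) 1).foldl
      (fun missing i => if PySem.Set.contains S i then missing else missing + i) 0
    = (if 1 ≤ mx then PySem.Int.floordiv (mx * (mx + 1)) 2
         - S.foldl (fun a x => if 1 ≤ x ∧ x ≤ mx then a + x else a) 0 else 0) := by
  by_cases hmx : 1 ≤ mx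
  · rw [if_pos hmx]
    rw [foldl_ite_skip (PySem.List.pyRange 1 (mx + 1) 1) (fun i => PySem.Set.contains S i) 0]
    rw [foldl_ite_add S (fun x => 1 ≤ x ∧ x ≤ mx) 0]
    simp only [zero_add]
    have hsplit := sum_filter_add_sum_filter_not (PySem.List.pyRange 1 (mx + 1) 1)
      (fun i => PySem.Set.contains S i)
    have hperm : ((PySem.List.pyRange 1 (mx + 1) 1).filter
        (fun i => PySem.Set.contains S i)).Perm
        (S.filter (fun x => decide (1 ≤ x ∧ x ≤ mx))) := by
      rw [List.perm_ext_iff_of_nodup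
        (List.Nodup.filter _ (PySem.List.nodup_pyRange_one 1 (mx + 1)))
        (List.Nodup.filter _ hS)]
      intro a
      simp only [List.mem_filter, PySem.List.mem_pyRange_one, decide_eq_true_eq,
        PySem.Set.contains_iff]
      constructor
      · rintro ⟨⟨h1', h2'⟩, h3'⟩; exact ⟨h3', h1', by omega⟩
      · rintro ⟨h3', h1', h2'⟩; exact ⟨⟨h1', by omega⟩, h3'⟩
    have hps := hperm.sum_eq
    have h2s : 2 * (PySem.List.pyRange 1 (mx + 1) 1).sum = mx * (mx + 1) := by
      rw [PySem.List.pyRange_one]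
      have hb : (mx + 1 - 1) = mx := by ring
      rw [hb]
      have h1 := sum_range_one mx.toNat
      have h0 : ((mx.toNat : Int)) = mx := Int.toNat_of_nonneg (by omega)
      rw [h0] at h1
      exact h1
    have hfd : PySem.Int.floordiv (mx * (mx + 1)) 2 = (PySem.List.pyRange 1 (mx + 1) 1).sum := by
      rw [PySem.Int.floordiv_eq_ediv_of_pos (by omega)]
      omega
    rw [hfd]
    linarith [hsplit, hps]
  · rw [if_neg hmx]
    have hnil : PySem.List.pyRange 1 (mx + 1) 1 = [] := PySem.List.pyRange_one_eq_nil (by omega)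
    rw [hnil]
    simp

-- loop returns 0 ⇒ a consecutive-run witness exists
theorem loopA_exists : ∀ (extra k0 : Int), solveLoopA extra k0 = 0 →
    ∃ t : Nat, (t : Int) * ((t : Int) + 2 * k0 - 1) = 2 * extra := by
  intro extra k0
  induction extra, k0 using solveLoopA.induct with
  | case1 e k he ih =>
    intro h
    rw [solveLoopA, if_pos he] at h
    obtain ⟨t, ht⟩ := ih h
    refine ⟨t + 1, ?_⟩
    push_cast
    push_cast at ht
    linear_combination ht
  | case2 e k he =>
    intro h
    rw [solveLoopA, if_neg he] at h
    refine ⟨0, ?_⟩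
    push_cast
    rw [h]
    ring

-- a consecutive-run witness ⇒ the loop returns 0 (for nonnegative extra)
theorem loopA_of_witness (t : Nat) : ∀ (extra k0 : Int), 0 ≤ extra →
    (t : Int) * ((t : Int) + 2 * k0 - 1) = 2 * extra → solveLoopA extra k0 = 0 := by
  induction t with
  | zero =>
    intro extra k0 he ht
    push_cast at ht
    have h0 : extra = 0 := by linarith [ht]
    rw [solveLoopA, if_neg (by omega)]
    exact h0
  | succ t ih =>
    intro extra k0 he ht
    push_cast at ht
    by_cases h0 : extra = 0
    · rw [solveLoopA, if_neg (by omega)]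
      exact h0
    · have hpos : extra > 0 := by omega
      rw [solveLoopA, if_pos hpos]
      have htn : (0:Int) ≤ (t : Int) := by positivity
      have hk : (0:Int) < (t : Int) + 2 * k0 := by
        by_contra hc
        push_neg at hc
        nlinarith
      have heq : 2 * (extra - k0) = (t : Int) * ((t : Int) + 2 * k0 + 1) := by
        linear_combination -ht
      have he' : 0 ≤ extra - k0 := by nlinarith
      apply ih (extra - k0) (k0 + 1) he'
      linear_combination ht

-- the binary search finds an exact nonnegative square root when it exists
theorem isqrtGo_eq (n s : Int) (hs : 0 ≤ s) (hn : s * s = n) :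
    ∀ (fuel : Nat) (lo hi : Int), (hi - lo).toNat = fuel → 0 ≤ lo → lo ≤ s → s < hi →
      isqrtGo n lo hi = s := by
  intro fuel
  induction fuel using Nat.strong_induction_on with
  | _ fuel ih =>
    intro lo hi hf hlo h1 h2
    rw [isqrtGo]
    by_cases hgap : hi - lo > 1
    · rw [if_pos hgap]
      have hmid2 : lo + 1 ≤ PySem.Int.floordiv (lo + hi) 2 ∧
          PySem.Int.floordiv (lo + hi) 2 ≤ hi - 1 := by
        rw [PySem.Int.floordiv_eq_ediv_of_pos (by omega)]
        omega
      by_cases hc : PySem.Int.floordiv (lo + hi) 2 * PySem.Int.floordiv (lo + hi) 2 ≤ n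
      · rw [if_pos hc]
        have hmids : PySem.Int.floordiv (lo + hi) 2 ≤ s := by
          by_contra hcc
          push_neg at hcc
          nlinarith
        exact ih ((hi - PySem.Int.floordiv (lo + hi) 2).toNat) (by omega) _ _ rfl (by omega)
          hmids h2
      · rw [if_neg hc]
        have hmids : s < PySem.Int.floordiv (lo + hi) 2 := by
          by_contra hcc
          push_neg at hcc
          nlinarith
        exact ih ((PySem.Int.floordiv (lo + hi) 2 - lo).toNat) (by omega) _ _ rfl hlo h1 hmids
    · rw [if_neg hgap]
      omega

-- isqrt detects perfect squares
theorem sq_test (d : Int) (hd : 0 ≤ d) :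
    (isqrt d * isqrt d = d) ↔ ∃ s : Int, 0 ≤ s ∧ s * s = d := by
  constructor
  · intro h
    exact ⟨|isqrt d|, abs_nonneg _, by rw [abs_mul_abs_self]; exact h⟩
  · rintro ⟨s, hs0, hss⟩
    have hsd : s ≤ d := by nlinarith
    rw [isqrt, isqrtGo_eq d s hs0 hss ((d + 1 - 0).toNat) 0 (d + 1) rfl (by omega) (by omega)
      (by omega)]
    exact hss

-- existence of a witness t ↔ the discriminant is a perfect square (c = 2*k0 - 1)
theorem witness_iff_square (extra k0 : Int) (he : 0 ≤ extra) :
    (∃ t : Nat, (t : Int) * ((t : Int) + 2 * k0 - 1) = 2 * extra) ↔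
    (∃ s : Int, 0 ≤ s ∧ s * s = (2 * k0 - 1) ^ 2 + 8 * extra) := by
  constructor
  · rintro ⟨t, ht⟩
    refine ⟨|2 * (t : Int) + (2 * k0 - 1)|, abs_nonneg _, ?_⟩
    rw [abs_mul_abs_self]
    linear_combination 4 * ht
  · rintro ⟨s, hs0, hss⟩
    rcases Int.even_or_odd s with ⟨a, ha⟩ | ⟨a, ha⟩
    · exfalso
      have h4 : 4 * (a * a - k0 * k0 + k0 - 2 * extra) = 1 := by
        subst ha
        linear_combination hss
      omega
    · have htnn : 0 ≤ a - k0 + 1 := by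
        rcases (by omega : 2 * k0 - 1 ≤ 0 ∨ 0 < 2 * k0 - 1) with hcle | hcpos
        · omega
        · have hcs : 2 * k0 - 1 ≤ s := by
            by_contra hcc
            push_neg at hcc
            nlinarith
          omega
      refine ⟨(a - k0 + 1).toNat, ?_⟩
      rw [Int.toNat_of_nonneg htnn]
      have h4 : 4 * ((a - k0 + 1) * ((a - k0 + 1) + 2 * k0 - 1)) = 4 * (2 * extra) := by
        subst ha
        linear_combination hss
      linarith [h4]

-- ===== VERDICT (by name: the statement is the Claim_ definition above) =====
theorem solve_spec : Claim_equal_solve := by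
  unfold Claim_equal_solve Spec_solve
  intro m target nums _ hpre
  cases nums with
  | nil => exact absurd rfl hpre
  | cons x xs => ?_
  cases hmax : PySem.List.max? (x :: xs) (fun y => y) with
  | none =>
    rw [PySem.List.max?_id_cons] at hmax
    simp at hmax
  | some mv =>
    simp only [solve, solve_alt, hmax, Option.getD_some]
    rw [missing_eq (PySem.Set.ofList (x :: xs)) (PySem.Set.nodup_ofList (x :: xs)) mv]
    set miss := (if 1 ≤ mv then PySem.Int.floordiv (mv * (mv + 1)) 2
      - (PySem.Set.ofList (x :: xs)).foldl (fun a x => if 1 ≤ x ∧ x ≤ mv then a + x else a) 0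
      else 0) with hmiss
    by_cases hlt : target < miss
    · rw [if_pos hlt, if_pos (by omega : target - miss < 0)]
    · rw [if_neg hlt, if_neg (by omega : ¬ target - miss < 0)]
      have he : 0 ≤ target - miss := by omega
      have hd0 : (0:Int) ≤ (2 * mv + 1) ^ 2 + 8 * (target - miss) := by
        have := sq_nonneg (2 * mv + 1)
        linarith
      have hcr : ((2 * (mv + 1) - 1 : Int)) = 2 * mv + 1 := by ring
      rw [Bool.eq_iff_iff]
      simp only [beq_iff_eq]
      constructor
      · intro hl
        have hsq := (witness_iff_square (target - miss) (mv + 1) he).mp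
          (loopA_exists _ _ hl)
        rw [hcr] at hsq
        exact (sq_test _ hd0).mpr hsq
      · intro hr
        have hsq := (sq_test _ hd0).mp hr
        rw [← hcr] at hsq
        obtain ⟨t, ht⟩ := (witness_iff_square (target - miss) (mv + 1) he).mpr hsq
        exact loopA_of_witness t _ _ he ht
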